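-- pv_equiv track=rewrite | github.com/gokulkumar1014/EdgeCoach-AI-Interview-Intelligence-Agent | lambda/analysis_engine.py | _prepare_sources
-- ===== SOURCE A (Python) =====
-- from typing import List, Dict, Any, Tuple
--
-- MAX_SOURCES = 3
--
-- MAX_SOURCE_CONTENT = 2500
--
-- MAX_CONTEXT = 9000
--
-- def _prepare_sources(sources: List[Dict[str, Any]]) -> Tuple[List[Dict[str, Any]], str]:
--     formatted: List[Dict[str, Any]] = []
--     context_blocks: List[str] = []
--
--     for doc in sources or []:
--         if len(formatted) >= MAX_SOURCES:
--             break
--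
--         content = (doc.get("content") or "").strip()
--         snippet = (doc.get("snippet") or doc.get("content") or "")[:300]
--         if not content:
--             continue
--
--         doc_id = doc.get("id") or f"S{len(formatted) + 1}"
--         title = (doc.get("title") or doc.get("url") or "Untitled source").strip()
--         source_domain = (doc.get("source") or "web").strip()
--         url = doc.get("url")
--
--         formatted.append(
--             {
--                 "id": doc_id,
--                 "title": title,
--                 "url": url,
--                 "source": source_domain,
--                 "snippet": snippet,
--             }
--         )
--
--         context_blocks.append(
--             f"[{doc_id}] {title}\n"
--             f"Source: {source_domain}\n"
--             f"URL: {url or 'unknown'}\n"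
--             f"Content:\n{content[:MAX_SOURCE_CONTENT]}\n"
--         )
--
--     context = "\n\n".join(context_blocks).strip()[:MAX_CONTEXT]
--     return formatted, context
-- ===== SOURCE B (Python) =====
-- from typing import List, Dict, Any, Tuple
--
-- MAX_SOURCES = 3
-- MAX_SOURCE_CONTENT = 2500
-- MAX_CONTEXT = 9000
--
-- def _go(docs, k, i):
--     # recursion over the remaining docs with an explicit budget k of slots left
--     # and the 1-based fallback index i; builds the rows and the context string
--     # directly (no intermediate block list, no join).
--     if k == 0 or not docs:
--         return [], ""
--     doc, rest = docs[0], docs[1:]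
--     content = (doc.get("content") or "").strip()
--     if not content:
--         return _go(rest, k, i)
--     row = {
--         "id": doc.get("id") or f"S{i}",
--         "title": (doc.get("title") or doc.get("url") or "Untitled source").strip(),
--         "url": doc.get("url"),
--         "source": (doc.get("source") or "web").strip(),
--         "snippet": (doc.get("snippet") or doc.get("content") or "")[:300],
--     }
--     block = (f"[{row['id']}] {row['title']}\n"
--              f"Source: {row['source']}\n"
--              f"URL: {row['url'] or 'unknown'}\n"
--              f"Content:\n{content[:MAX_SOURCE_CONTENT]}\n")
--     tail_rows, tail_ctx = _go(rest, k - 1, i + 1)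
--     ctx = block if not tail_rows else block + "\n\n" + tail_ctx
--     return [row] + tail_rows, ctx
--
-- def _prepare_sources(sources: List[Dict[str, Any]]) -> Tuple[List[Dict[str, Any]], str]:
--     rows, ctx = _go(list(sources or []), MAX_SOURCES, 1)
--     return rows, ctx.strip()[:MAX_CONTEXT]
-- ===== Notes on version B (the rewrite author's own statement) =====
-- stated objective: alternative
-- what changed: Replaced A's single stateful loop with break/continue, length-based fallback ids and a block list joined at the end by a structural recursion carrying an explicit remaining-slot budget and 1-based index, which builds the rows back-to-front and concatenates the context string directly with '\n\n' separators (no block list, no join).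
import Mathlib
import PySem

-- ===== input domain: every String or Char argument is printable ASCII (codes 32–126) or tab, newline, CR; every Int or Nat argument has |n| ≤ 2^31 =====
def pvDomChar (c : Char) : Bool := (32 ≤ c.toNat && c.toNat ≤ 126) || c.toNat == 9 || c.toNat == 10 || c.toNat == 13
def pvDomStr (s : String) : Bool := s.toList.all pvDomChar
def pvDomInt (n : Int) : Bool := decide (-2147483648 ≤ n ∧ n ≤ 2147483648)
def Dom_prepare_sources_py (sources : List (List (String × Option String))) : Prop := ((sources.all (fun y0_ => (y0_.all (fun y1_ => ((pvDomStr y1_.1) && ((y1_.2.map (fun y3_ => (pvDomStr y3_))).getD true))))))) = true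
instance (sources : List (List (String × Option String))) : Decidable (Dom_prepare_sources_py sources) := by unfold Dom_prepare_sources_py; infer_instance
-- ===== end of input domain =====

-- B replaces A's single stateful loop (break/continue, length-based fallback ids, block list
-- joined at the end) by a structural recursion with an explicit remaining-slot budget that
-- builds the rows back-to-front and concatenates the context string directly (objective: alternative).

-- shared helpers: both Python sources contain these exact expressions
-- doc.get(k): none iff the key is missing or maps to None (both are Python None here)
def pvGet (d : List (String × Option String)) (k : String) : Option String :=
  ((d.find? (fun p => p.1 == k)).map (·.2)).join

-- 'x or y' with x an Optional[str] and y a str (None and "" are falsy)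
def pvOrS (x : Option String) (y : String) : String :=
  match x with
  | some s => if s = "" then y else s
  | none => y

-- 'x or y' with both Optional[str]
def pvOrO (x y : Option String) : Option String :=
  match x with
  | some s => if s = "" then y else some s
  | none => y

-- (doc.get("content") or "").strip()
def pvContent (d : List (String × Option String)) : String :=
  PySem.Str.strip (pvOrS (pvGet d "content") "")

-- (doc.get("snippet") or doc.get("content") or "")[:300]
def pvSnippet (d : List (String × Option String)) : String :=
  PySem.Str.slice (pvOrS (pvOrO (pvGet d "snippet") (pvGet d "content")) "") none (some 300)

-- the per-doc formatted dict and context block, with n the 1-based fallback index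
def pvRow (n : Int) (d : List (String × Option String)) :
    (List (String × Option String)) × String :=
  let content := pvContent d
  let snippet := pvSnippet d
  let doc_id := pvOrS (pvGet d "id") (PySem.Str.join "" ["S", PySem.Int.toStr n])
  let title := PySem.Str.strip (pvOrS (pvOrO (pvGet d "title") (pvGet d "url")) "Untitled source")
  let source_domain := PySem.Str.strip (pvOrS (pvGet d "source") "web")
  let url := pvGet d "url"
  ([("id", some doc_id), ("title", some title), ("url", url),
    ("source", some source_domain), ("snippet", some snippet)],
   PySem.Str.join "" ["[", doc_id, "] ", title, "\nSource: ", source_domain,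
     "\nURL: ", pvOrS url "unknown", "\nContent:\n",
     PySem.Str.slice content none (some 2500), "\n"])

-- ===== PORT A =====
-- A's loop: state (formatted, context_blocks); break at MAX_SOURCES=3, continue on empty content
def prepLoopA (docs : List (List (String × Option String)))
    (formatted : List (List (String × Option String))) (blocks : List String) :
    (List (List (String × Option String))) × (List String) :=
  match docs with
  | [] => (formatted, blocks)
  | d :: rest =>
    if 3 ≤ formatted.length then (formatted, blocks)
    else
      let content := pvContent d
      if content = "" then prepLoopA rest formatted blocks
      else
        let row := pvRow ((formatted.length : Int) + 1) d
        prepLoopA rest (formatted ++ [row.1]) (blocks ++ [row.2])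

-- '\n\n'.join(blocks).strip()[:MAX_CONTEXT]
def pvContext (blocks : List String) : String :=
  PySem.Str.slice (PySem.Str.strip (PySem.Str.join "\n\n" blocks)) none (some 9000)

def prepare_sources_py (sources : List (List (String × Option String))) : (List (List (String × Option String))) × String :=
  let r := prepLoopA sources [] []
  (r.1, pvContext r.2)

-- ===== PORT B =====
-- B's recursion _go(docs, k, i): budget k of slots left, 1-based fallback index i;
-- returns the rows and the context string built directly with '\n\n' separators
def prepGoB (docs : List (List (String × Option String))) (k : Nat) (i : Int) :
    (List (List (String × Option String))) × String :=
  match docs with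
  | [] => ([], "")
  | d :: rest =>
    if k = 0 then ([], "")
    else
      let content := pvContent d
      if content = "" then prepGoB rest k i
      else
        let row := pvRow i d
        let t := prepGoB rest (k - 1) (i + 1)
        (row.1 :: t.1,
         if t.1.isEmpty then row.2 else PySem.Str.join "" [row.2, "\n\n", t.2])

def prepare_sources_py_alt (sources : List (List (String × Option String))) : (List (List (String × Option String))) × String :=
  let r := prepGoB sources 3 1
  (r.1, PySem.Str.slice (PySem.Str.strip r.2) none (some 9000))

-- ===== PRECONDITION & SPEC =====
def Spec_prepare_sources_py (sources : List (List (String × Option String))) (out : (List (List (String × Option String))) × String) : Prop := out = prepare_sources_py_alt sources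
instance (sources : List (List (String × Option String))) (out : (List (List (String × Option String))) × String) : Decidable (Spec_prepare_sources_py sources out) := by unfold Spec_prepare_sources_py; infer_instance

-- ===== CLAIM (what is proved, stated in full; the proofs are below) =====
def Claim_equal_prepare_sources_py : Prop := ∀ (sources : List (List (String × Option String))), Dom_prepare_sources_py sources → Spec_prepare_sources_py sources (prepare_sources_py sources)

-- ===== LEMMAS AND PROOFS =====
-- normal form both ports are reduced to
def pvPairs (docs : List (List (String × Option String))) (k : Nat) (i : Int) :
    List ((List (String × Option String)) × String) :=
  (PySem.List.enumerate ((docs.filter (fun d => pvContent d ≠ "")).take k) i).map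
    (fun p => pvRow p.1 p.2)

-- invariant of A's loop: it appends exactly the rows of the normal form, with
-- fallback ids continuing at |formatted| + 1
theorem prepLoopA_eq (docs : List (List (String × Option String)))
    (formatted : List (List (String × Option String))) (blocks : List String) :
    prepLoopA docs formatted blocks =
      (formatted ++ (pvPairs docs (3 - formatted.length) ((formatted.length : Int) + 1)).map (·.1),
       blocks ++ (pvPairs docs (3 - formatted.length) ((formatted.length : Int) + 1)).map (·.2)) := by
  induction docs generalizing formatted blocks with
  | nil => simp [prepLoopA, pvPairs]
  | cons d rest ih =>
    by_cases h3 : 3 ≤ formatted.length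
    · have : 3 - formatted.length = 0 := by omega
      simp [prepLoopA, h3, this, pvPairs]
    · by_cases hc : pvContent d = ""
      · simp [prepLoopA, h3, hc, ih, pvPairs]
      · have ht : (d :: (rest.filter (fun d => pvContent d ≠ ""))).take (3 - formatted.length)
            = d :: (rest.filter (fun d => pvContent d ≠ "")).take (3 - formatted.length - 1) := by
          have : 3 - formatted.length = (3 - formatted.length - 1) + 1 := by omega
          rw [this]; rfl
      -- unfold one loop step and apply the induction hypothesis
        simp only [prepLoopA, h3, if_neg, List.filter_cons, hc, ne_eq,
          not_false_eq_true, decide_true, if_true]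
        rw [ih]
        have hlen : (formatted ++ [(pvRow ((formatted.length : Int) + 1) d).1]).length
            = formatted.length + 1 := by simp
        rw [hlen]
        have harith : 3 - (formatted.length + 1) = 3 - formatted.length - 1 := by omega
        simp only [pvPairs, List.filter_cons, hc, ne_eq, not_false_eq_true, decide_true,
          if_true, harith, ht, PySem.List.enumerate_cons]
        simp [List.append_assoc]

-- joining with a separator, written as B's incremental concatenation
theorem join_step (b : String) (bs : List String) :
    PySem.Str.join "\n\n" (b :: bs) =
      if bs.isEmpty then b else PySem.Str.join "" [b, "\n\n", PySem.Str.join "\n\n" bs] := by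
  cases bs with
  | nil =>
    apply String.ext
    simp [PySem.Str.join, PySem.Chars.join, List.intercalate]
  | cons c cs =>
    apply String.ext
    simp [PySem.Str.join, PySem.Chars.join, List.intercalate]

-- invariant of B's recursion: it produces exactly the rows and the joined blocks
-- of the normal form
theorem prepGoB_eq (docs : List (List (String × Option String))) (k : Nat) (i : Int) :
    prepGoB docs k i =
      ((pvPairs docs k i).map (·.1), PySem.Str.join "\n\n" ((pvPairs docs k i).map (·.2))) := by
  induction docs generalizing k i with
  | nil => simp [prepGoB, pvPairs, PySem.Str.join, PySem.Chars.join, List.intercalate]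
  | cons d rest ih =>
    by_cases hk : k = 0
    · simp [prepGoB, hk, pvPairs, PySem.Str.join, PySem.Chars.join, List.intercalate]
    · by_cases hc : pvContent d = ""
      · simp [prepGoB, hk, hc, ih, pvPairs]
      · have ht : (d :: (rest.filter (fun d => pvContent d ≠ ""))).take k
            = d :: (rest.filter (fun d => pvContent d ≠ "")).take (k - 1) := by
          have : k = (k - 1) + 1 := by omega
          rw [this]; rfl
        simp only [prepGoB, hk, if_neg, hc, not_false_eq_true, if_true, ih]
        simp only [pvPairs, List.filter_cons, hc, ne_eq, not_false_eq_true, decide_true,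
          if_true, ht, PySem.List.enumerate_cons, List.map_cons]
        rw [join_step]
        simp

-- ===== VERDICT (by name: the statement is the Claim_ definition above) =====
theorem prepare_sources_py_spec : Claim_equal_prepare_sources_py := by
  intro sources _
  unfold Spec_prepare_sources_py prepare_sources_py prepare_sources_py_alt
  rw [prepLoopA_eq, prepGoB_eq]
  simp [pvContext]
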